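-- pv_equiv track=rewrite | github.com/venkatarun95/mit-6.863-non-native-english | bigram.py | admissible_ngram
-- ===== SOURCE A (Python) =====
-- def admissible_ngram(ngram):
--     '''Returns an admissible ngram if possible. Else returns None.'''
--     if len(ngram) == 0:
--         return ''
--
--     c = ngram[0]
--     res = None
--     if c.isalpha():
--         res = c.lower()
--     elif c.isspace():
--         res = ' '
--     elif c in ['-', ',', '.']:
--         res = c
--     else:
--         return None
--
--     x = admissible_ngram(ngram[1:])
--     if x is None:
--         return None
--     return res + x
-- ===== SOURCE B (Python) =====
-- def admissible_ngram(ngram):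
--     '''Returns an admissible ngram if possible. Else returns None.'''
--     out = []
--     for c in ngram:
--         if c.isalpha():
--             out.append(c.lower())
--         elif c.isspace():
--             out.append(' ')
--         elif c in ('-', ',', '.'):
--             out.append(c)
--         else:
--             return None
--     return ''.join(out)
-- ===== Notes on version B (the rewrite author's own statement) =====
-- stated objective: faster
-- what changed: Replaced the O(n^2) tail recursion (which rebuilds ngram[1:] and re-concatenates res + x at every level) with a single forward loop over an accumulator list joined once at the end, with an in-loop early return on the first inadmissible character.
import Mathlib
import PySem

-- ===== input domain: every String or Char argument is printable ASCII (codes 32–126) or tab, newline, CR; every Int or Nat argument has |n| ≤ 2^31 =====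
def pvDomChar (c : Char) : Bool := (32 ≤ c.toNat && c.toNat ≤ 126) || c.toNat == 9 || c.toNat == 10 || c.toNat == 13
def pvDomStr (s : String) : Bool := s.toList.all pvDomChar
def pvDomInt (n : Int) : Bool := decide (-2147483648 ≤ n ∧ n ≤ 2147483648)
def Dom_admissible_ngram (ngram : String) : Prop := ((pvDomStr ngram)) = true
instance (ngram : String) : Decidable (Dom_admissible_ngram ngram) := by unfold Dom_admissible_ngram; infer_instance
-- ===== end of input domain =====

-- B replaces A's tail recursion (re-slicing and re-concatenating at every level) with one
-- forward loop over an accumulator, joined once at the end; return value is identical.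

-- ===== PORT A =====
-- A recurses on the string: classify the head, recurse on ngram[1:], prepend res.
def admissible_ngramRec : List Char → Option (List Char)
  | [] => some []
  | c :: rest =>
      let res? : Option Char :=
        if PySem.Chars.isalpha c then some (PySem.Chars.lowerChar c)
        else if PySem.Chars.isspace c then some ' '
        else if c == '-' || c == ',' || c == '.' then some c
        else none
      match res? with
      | none => none
      | some res =>
        match admissible_ngramRec rest with
        | none => none
        | some x => some (res :: x)

def admissible_ngram (ngram : String) : Option String :=
  (admissible_ngramRec ngram.toList).map String.ofList

-- ===== PORT B =====
-- B's loop: accumulator `out`, early return none on the first inadmissible character.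
def admissible_ngramLoop (out : List Char) : List Char → Option (List Char)
  | [] => some out
  | c :: rest =>
      if PySem.Chars.isalpha c then admissible_ngramLoop (out ++ [PySem.Chars.lowerChar c]) rest
      else if PySem.Chars.isspace c then admissible_ngramLoop (out ++ [' ']) rest
      else if c == '-' || c == ',' || c == '.' then admissible_ngramLoop (out ++ [c]) rest
      else none

def admissible_ngram_alt (ngram : String) : Option String :=
  (admissible_ngramLoop [] ngram.toList).map String.ofList

-- ===== PRECONDITION & SPEC =====
def Spec_admissible_ngram (ngram : String) (out : Option String) : Prop := out = admissible_ngram_alt ngram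
instance (ngram : String) (out : Option String) : Decidable (Spec_admissible_ngram ngram out) := by unfold Spec_admissible_ngram; infer_instance

-- ===== CLAIM (what is proved, stated in full; the proofs are below) =====
def Claim_equal_admissible_ngram : Prop := ∀ (ngram : String), Dom_admissible_ngram ngram → Spec_admissible_ngram ngram (admissible_ngram ngram)

-- ===== LEMMAS AND PROOFS =====
-- Loop invariant: B's loop from accumulator `out` computes A's recursion with `out` prepended.
theorem loop_eq_rec (cs : List Char) : ∀ out : List Char,
    admissible_ngramLoop out cs = (admissible_ngramRec cs).map (out ++ ·) := by
  induction cs with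
  | nil => intro out; simp [admissible_ngramLoop, admissible_ngramRec]
  | cons c rest ih =>
      intro out
      simp only [admissible_ngramLoop, admissible_ngramRec]
      split_ifs <;> simp_all <;>
        cases admissible_ngramRec rest <;> simp

-- ===== VERDICT (by name: the statement is the Claim_ definition above) =====
theorem admissible_ngram_spec : Claim_equal_admissible_ngram := by
  intro ngram _
  unfold Spec_admissible_ngram admissible_ngram admissible_ngram_alt
  rw [loop_eq_rec]
  cases admissible_ngramRec ngram.toList <;> simp
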